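-- pv_equiv track=rewrite | github.com/miliar/Code_Jam_Webscraper | solutions_python/Problem_137/112.py | draw_1_dim
-- ===== SOURCE A (Python) =====
-- def draw_1_dim (R, C, M):
--     res = []
--     for a in range(R):
--         res.append(['*' for x in range(C)])
--     for i in range(R):
--         for j in range(C):
--             if (i+j)<(R*C-M):
--                 res[i][j] = '.'
--     res[0][0] = 'c'
--     return res
-- ===== SOURCE B (Python) =====
-- def draw_1_dim(R, C, M):
--     threshold = R * C - M
--     res = []
--     for i in range(R):
--         dots = max(0, min(C, threshold - i))
--         res.append(['.'] * dots + ['*'] * (C - dots))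
--     res[0][0] = 'c'
--     return res
-- ===== Notes on version B (the rewrite author's own statement) =====
-- stated objective: simpler
-- what changed: Replaces the fill-all-stars-then-rewrite-each-cell nested scan by a single pass that computes each row's dot/star boundary in closed form and builds the row by list repetition.
import Mathlib
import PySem

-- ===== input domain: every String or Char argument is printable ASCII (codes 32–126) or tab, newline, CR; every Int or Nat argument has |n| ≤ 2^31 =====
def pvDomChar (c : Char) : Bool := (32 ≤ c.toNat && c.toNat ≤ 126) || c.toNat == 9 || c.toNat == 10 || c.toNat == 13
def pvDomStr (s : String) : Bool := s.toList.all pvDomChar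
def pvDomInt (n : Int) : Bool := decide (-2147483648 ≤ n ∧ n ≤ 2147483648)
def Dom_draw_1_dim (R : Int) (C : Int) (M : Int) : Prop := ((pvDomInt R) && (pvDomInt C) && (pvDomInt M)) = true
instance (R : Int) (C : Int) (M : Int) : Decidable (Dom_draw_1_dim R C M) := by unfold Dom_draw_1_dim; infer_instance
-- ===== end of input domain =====

-- B builds each row directly from its computed dot/star boundary instead of A's fill-then-rewrite
-- nested cell scan; objective: simpler (equal asymptotic cost).

-- ===== PORT A =====
-- res[i][j] = v is ported as List.modify i.toNat (row.set j.toNat v): exact, since i and j come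
-- from range(R)/range(C) and are therefore nonnegative and in range.
def draw_1_dim (R : Int) (C : Int) (M : Int) : List (List String) :=
  let res : List (List String) :=
    (PySem.List.pyRange 0 R 1).foldl
      (fun res _a => res ++ [(PySem.List.pyRange 0 C 1).map (fun _x => "*")]) []
  let res :=
    (PySem.List.pyRange 0 R 1).foldl
      (fun res i =>
        (PySem.List.pyRange 0 C 1).foldl
          (fun res j =>
            if i + j < R * C - M then res.modify i.toNat (fun row => row.set j.toNat ".") else res)
          res)
      res
  res.modify 0 (fun row => row.set 0 "c")

-- ===== PORT B =====
def draw_1_dim_alt (R : Int) (C : Int) (M : Int) : List (List String) :=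
  let threshold := R * C - M
  let res : List (List String) :=
    (PySem.List.pyRange 0 R 1).foldl
      (fun res i =>
        let dots := max 0 (min C (threshold - i))
        res ++ [PySem.List.pyRepeat ["."] dots ++ PySem.List.pyRepeat ["*"] (C - dots)])
      []
  res.modify 0 (fun row => row.set 0 "c")

-- ===== PRECONDITION & SPEC =====
-- A raises IndexError at res[0][0] when R ≤ 0 or C ≤ 0 (the grid is empty); excluded here.
def Pre_draw_1_dim (R : Int) (C : Int) (M : Int) : Prop := 1 ≤ R ∧ 1 ≤ C
instance (R : Int) (C : Int) (M : Int) : Decidable (Pre_draw_1_dim R C M) := by unfold Pre_draw_1_dim; infer_instance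
def pvWitness_draw_1_dim : Int × Int × Int := (2, 3, 1)

def Spec_draw_1_dim (R : Int) (C : Int) (M : Int) (out : List (List String)) : Prop := out = draw_1_dim_alt R C M
instance (R : Int) (C : Int) (M : Int) (out : List (List String)) : Decidable (Spec_draw_1_dim R C M out) := by unfold Spec_draw_1_dim; infer_instance

-- ===== CLAIM (what is proved, stated in full; the proofs are below) =====
def Claim_equal_draw_1_dim : Prop := ∀ (R : Int) (C : Int) (M : Int), Dom_draw_1_dim R C M → Pre_draw_1_dim R C M → Spec_draw_1_dim R C M (draw_1_dim R C M)

-- ===== LEMMAS AND PROOFS =====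

theorem pv_modify_id {α : Type} (l : List α) (k : Nat) : l.modify k (fun x => x) = l := by
  apply List.ext_getElem
  · simp
  · intro j h1 h2; simp [List.getElem_modify]

theorem pv_modify_modify {α : Type} (l : List α) (k : Nat) (f g : α → α) :
    (l.modify k f).modify k g = l.modify k (fun x => g (f x)) := by
  apply List.ext_getElem
  · simp
  · intro j h1 h2
    simp only [List.getElem_modify]
    split <;> rfl

theorem pv_foldl_modify_factor {α β : Type} (js : List β) (l : List α) (k : Nat)
    (step : α → β → α) :
    js.foldl (fun l j => l.modify k (fun x => step x j)) l
      = l.modify k (fun x => js.foldl step x) := by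
  induction js generalizing l with
  | nil => simp [pv_modify_id]
  | cons j js ih => simp only [List.foldl_cons, ih, pv_modify_modify]

theorem pv_foldl_modify_range {α : Type} (n : Nat) (l : List α) (g : Nat → α → α) :
    (List.range n).foldl (fun l i => l.modify i (g i)) l
      = l.mapIdx (fun i x => if i < n then g i x else x) := by
  induction n with
  | zero =>
    simp only [List.range_zero, List.foldl_nil]
    apply List.ext_getElem
    · simp
    · intro j h1 h2; simp [List.getElem_mapIdx]
  | succ n ih =>
    rw [List.range_succ, List.foldl_append, ih]
    simp only [List.foldl_cons, List.foldl_nil]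
    apply List.ext_getElem
    · simp
    · intro j h1 h2
      simp only [List.getElem_modify, List.getElem_mapIdx]
      by_cases h3 : n = j
      · subst h3; simp
      · simp only [if_neg h3]
        split_ifs <;> first | rfl | omega

theorem pv_foldl_set_range {α : Type} (n : Nat) (row : List α) (P : Nat → Prop) [DecidablePred P] (s : α) :
    (List.range n).foldl (fun row j => if P j then row.set j s else row) row
      = row.mapIdx (fun j x => if j < n ∧ P j then s else x) := by
  induction n with
  | zero =>
    simp only [List.range_zero, List.foldl_nil]
    apply List.ext_getElem
    · simp
    · intro j h1 h2; simp [List.getElem_mapIdx]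
  | succ n ih =>
    rw [List.range_succ, List.foldl_append, ih]
    simp only [List.foldl_cons, List.foldl_nil]
    by_cases hp : P n
    · simp only [if_pos hp]
      apply List.ext_getElem
      · simp
      · intro j h1 h2
        simp only [List.getElem_set, List.getElem_mapIdx]
        by_cases h3 : n = j
        · subst h3; simp [hp]
        · simp only [if_neg h3]
          by_cases hq : P j
          · simp only [hq, and_true]
            split_ifs <;> first | rfl | omega
          · simp [hq]
    · simp only [if_neg hp]
      apply List.ext_getElem
      · simp
      · intro j h1 h2
        simp only [List.getElem_mapIdx]
        by_cases hq : P j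
        · simp only [hq, and_true]
          have h3 : j ≠ n := fun h => hp (h ▸ hq)
          split_ifs <;> first | rfl | omega
        · simp [hq]

theorem pv_foldl_append_map {α β : Type} (l : List β) (f : β → α) (acc : List α) :
    l.foldl (fun acc x => acc ++ [f x]) acc = acc ++ l.map f := by
  induction l generalizing acc with
  | nil => simp
  | cons x l ih => simp [ih]

-- ===== VERDICT (by name: the statement is the Claim_ definition above) =====
theorem draw_1_dim_spec : Claim_equal_draw_1_dim := by
  intro R C M _dom hpre
  obtain ⟨hR, hC⟩ := hpre
  show draw_1_dim R C M = draw_1_dim_alt R C M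
  unfold draw_1_dim draw_1_dim_alt
  simp only [PySem.List.pyRange_one, Int.sub_zero, zero_add, List.foldl_map,
    PySem.List.pyRepeat_singleton, Int.toNat_natCast, pv_foldl_append_map, List.nil_append]
  congr 1
  have hstep : ∀ (k : Nat) (res : List (List String)),
      List.foldl (fun x (j : Nat) => if (k:Int) + (j:Int) < R*C-M then x.modify k (fun row => row.set j ".") else x) res (List.range C.toNat)
      = res.modify k (fun row => List.foldl (fun row (j : Nat) => if (k:Int)+(j:Int) < R*C-M then row.set j "." else row) row (List.range C.toNat)) := by
    intro k res
    rw [show (fun (x : List (List String)) (j : Nat) => if (k:Int) + (j:Int) < R*C-M then x.modify k (fun row => row.set j ".") else x)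
         = (fun x j => x.modify k (fun row => if (k:Int)+(j:Int) < R*C-M then row.set j "." else row)) from funext fun x => funext fun j => by
           split_ifs with h
           · rfl
           · exact (pv_modify_id x k).symm]
    exact pv_foldl_modify_factor _ _ _ _
  simp only [hstep, pv_foldl_modify_range, pv_foldl_set_range]
  apply List.ext_getElem
  · simp
  · intro k h1 h2
    simp only [List.getElem_mapIdx, List.getElem_map, List.getElem_range]
    have hk : k < R.toNat := by simpa using h2
    simp only [if_pos hk]
    apply List.ext_getElem
    · simp; omega
    · intro j hj1 hj2
      simp only [List.getElem_mapIdx, List.getElem_map, List.getElem_range, List.getElem_append,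
        List.getElem_replicate, List.length_replicate]
      have hj : j < C.toNat := by simpa using hj1
      split_ifs <;> first | rfl | (exfalso; omega)
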